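-- pv_equiv track=rewrite | github.com/Verita-Artificial-Intelligence/AI_Intreview | backend/routers/admin.py | _coerce_tags
-- ===== SOURCE A (Python) =====
-- from typing import List, Optional, Sequence, Union, cast
--
-- def _coerce_tags(raw: Optional[Sequence[str]]) -> List[str]:
--     if not raw:
--         return []
--     tags: List[str] = []
--     for value in raw:
--         if value is None:
--             continue
--         for token in str(value).split(","):
--             cleaned = token.strip()
--             if cleaned:
--                 tags.append(cleaned)
--     return tags
-- ===== SOURCE B (Python) =====
-- from typing import List, Optional, Sequence
--
--
-- def _coerce_tags(raw: Optional[Sequence[str]]) -> List[str]: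
--     if not raw:
--         return []
--     s = ",".join(str(v) for v in raw if v is not None)
--     return [c for c in (t.strip() for t in s.split(",")) if c]
-- ===== Notes on version B (the rewrite author's own statement) =====
-- stated objective: alternative
-- what changed: Instead of nested loops (per-value split, then a token loop with an accumulator), B joins all values into one comma-separated string and tokenizes it in a single split/strip/filter pass; empty tokens at join boundaries are filtered out, so the results coincide.
import Mathlib
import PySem

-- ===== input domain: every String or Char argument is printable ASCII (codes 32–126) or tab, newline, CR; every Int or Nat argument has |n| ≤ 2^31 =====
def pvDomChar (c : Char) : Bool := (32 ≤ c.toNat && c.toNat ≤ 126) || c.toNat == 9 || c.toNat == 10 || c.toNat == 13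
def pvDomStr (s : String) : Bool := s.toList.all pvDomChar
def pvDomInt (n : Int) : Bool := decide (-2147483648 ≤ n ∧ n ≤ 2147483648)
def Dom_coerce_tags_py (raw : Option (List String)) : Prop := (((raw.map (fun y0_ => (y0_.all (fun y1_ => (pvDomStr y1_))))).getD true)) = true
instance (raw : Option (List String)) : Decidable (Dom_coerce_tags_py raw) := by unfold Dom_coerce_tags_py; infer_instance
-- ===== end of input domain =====

-- B replaces A's nested per-value split loops by one join into a single comma-separated
-- string followed by a single split/strip/filter pass (same cost; different decomposition).


-- ===== PORT A =====
-- A: guard 'if not raw', then for each value split it on "," and append each nonempty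
-- stripped token to the accumulator.  (The values are Strings under the type convention,
-- so the 'value is None' branch never fires and str(value) = value.)
def coerce_tags_py (raw : Option (List String)) : List String :=
  match raw with
  | none => []
  | some [] => []
  | some vs =>
    vs.foldl (fun tags value =>
      (PySem.Chars.splitOn value.toList ",".toList).foldl (fun tags token =>
        if PySem.Chars.strip token ≠ [] then tags ++ [String.ofList (PySem.Chars.strip token)]
        else tags) tags) []

-- ===== PORT B =====
-- B: join all values with "," into one string, then one split/strip/filter pass.
def coerce_tags_py_alt (raw : Option (List String)) : List String :=
  let vs := raw.getD []
  if vs = [] then []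
  else
    let s := PySem.Str.join "," vs
    (PySem.Chars.splitOn s.toList ",".toList).filterMap (fun t =>
      if PySem.Chars.strip t = [] then none else some (String.ofList (PySem.Chars.strip t)))

-- ===== PRECONDITION & SPEC =====
def Spec_coerce_tags_py (raw : Option (List String)) (out : List String) : Prop := out = coerce_tags_py_alt raw
instance (raw : Option (List String)) (out : List String) : Decidable (Spec_coerce_tags_py raw out) := by unfold Spec_coerce_tags_py; infer_instance

-- ===== CLAIM (what is proved, stated in full; the proofs are below) =====
def Claim_equal_coerce_tags_py : Prop := ∀ (raw : Option (List String)), Dom_coerce_tags_py raw → Spec_coerce_tags_py raw (coerce_tags_py raw)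

-- ===== LEMMAS AND PROOFS =====

def splitRun (c : Char) : List Char → List Char → List (List Char) → List (List Char)
  | [], cur, acc => (cur.reverse :: acc).reverse
  | x :: xs, cur, acc =>
    if x = c then splitRun c xs [] (cur.reverse :: acc) else splitRun c xs (x :: cur) acc

theorem splitOn_go_eq (c : Char) : ∀ (l : List Char) (fuel : Nat), l.length ≤ fuel →
    ∀ (cur : List Char) (accs : List (List Char)),
    PySem.Chars.splitOn.go [c] fuel l cur accs = splitRun c l cur accs := by
  intro l
  induction l with
  | nil =>
    intro fuel _ cur accs
    cases fuel <;> simp [PySem.Chars.splitOn.go, splitRun]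
  | cons x xs ih =>
    intro fuel hf cur accs
    cases fuel with
    | zero => simp at hf
    | succ f =>
      rw [PySem.Chars.splitOn.go]
      by_cases h : x = c
      · subst h
        simp [List.isPrefixOf, splitRun, ih f (by simpa using hf)]
      · have : List.isPrefixOf [c] (x :: xs) = false := by
          simp [List.isPrefixOf]; exact fun hc => absurd hc.symm h
        simp [this, splitRun, h, ih f (by simpa using hf)]

theorem splitRun_acc (c : Char) : ∀ (l cur : List Char) (acc : List (List Char)),
    splitRun c l cur acc = acc.reverse ++ splitRun c l cur [] := by
  intro l
  induction l with
  | nil => intro cur acc; simp [splitRun]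
  | cons x xs ih =>
    intro cur acc
    by_cases h : x = c
    · simp [splitRun, h, ih [] (cur.reverse :: acc), ih [] [cur.reverse]]
    · simp [splitRun, h, ih (x :: cur) acc]

theorem splitRun_append (c : Char) (b : List Char) : ∀ (a cur : List Char),
    splitRun c (a ++ c :: b) cur [] = splitRun c a cur [] ++ splitRun c b [] [] := by
  intro a
  induction a with
  | nil =>
    intro cur
    simp [splitRun, splitRun_acc c b [] [cur.reverse]]
  | cons x xs ih =>
    intro cur
    by_cases h : x = c
    · simp [splitRun, h, splitRun_acc c (xs ++ c :: b) [] [cur.reverse],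
        splitRun_acc c xs [] [cur.reverse], ih []]
    · simp [splitRun, h, ih (x :: cur)]

theorem splitOn_eq_splitRun (c : Char) (l : List Char) :
    PySem.Chars.splitOn l [c] = splitRun c l [] [] := by
  rw [PySem.Chars.splitOn, splitOn_go_eq c l (l.length + 1) (by omega)]

theorem splitOn_append_single (c : Char) (a b : List Char) :
    PySem.Chars.splitOn (a ++ c :: b) [c] = PySem.Chars.splitOn a [c] ++ PySem.Chars.splitOn b [c] := by
  simp [splitOn_eq_splitRun, splitRun_append]

theorem splitOn_join (c : Char) : ∀ (v : List Char) (vs : List (List Char)),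
    PySem.Chars.splitOn (PySem.Chars.join [c] (v :: vs)) [c]
      = PySem.Chars.splitOn v [c] ++ vs.flatMap (fun w => PySem.Chars.splitOn w [c]) := by
  intro v vs
  induction vs generalizing v with
  | nil => simp [PySem.Chars.join, List.intercalate]
  | cons w ws ih =>
    have hj : PySem.Chars.join [c] (v :: w :: ws) = v ++ c :: PySem.Chars.join [c] (w :: ws) := by
      simp [PySem.Chars.join, List.intercalate]
    rw [hj, splitOn_append_single, ih w]
    simp

def gtok (t : List Char) : Option String :=
  if PySem.Chars.strip t = [] then none else some (String.ofList (PySem.Chars.strip t))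

theorem inner_foldl (toks : List (List Char)) : ∀ (tags : List String),
    toks.foldl (fun tags token =>
      if PySem.Chars.strip token ≠ [] then tags ++ [String.ofList (PySem.Chars.strip token)]
      else tags) tags = tags ++ toks.filterMap gtok := by
  induction toks with
  | nil => intro tags; simp
  | cons t ts ih =>
    intro tags
    rw [List.foldl_cons, List.filterMap_cons]
    by_cases h : PySem.Chars.strip t = []
    · rw [if_neg (by simp [h]), ih]
      rw [show gtok t = none from by rw [gtok, if_pos h]]
    · rw [if_pos h, ih]
      rw [show gtok t = some (String.ofList (PySem.Chars.strip t)) from by rw [gtok, if_neg h]]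
      simp

theorem filterMap_flatMap' {α β γ : Type} (l : List α) (f : α → List β) (g : β → Option γ) :
    (l.flatMap f).filterMap g = l.flatMap (fun a => (f a).filterMap g) := by
  induction l with
  | nil => simp
  | cons a l ih => simp [List.filterMap_append, ih]

theorem outer_foldl (vs : List String) : ∀ (tags : List String),
    vs.foldl (fun tags value =>
      (PySem.Chars.splitOn value.toList ",".toList).foldl (fun tags token =>
        if PySem.Chars.strip token ≠ [] then tags ++ [String.ofList (PySem.Chars.strip token)]
        else tags) tags) tags
    = tags ++ vs.flatMap (fun v => (PySem.Chars.splitOn v.toList ",".toList).filterMap gtok) := by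
  induction vs with
  | nil => intro tags; simp
  | cons v vs ih =>
    intro tags
    rw [List.foldl_cons, inner_foldl, ih, List.flatMap_cons, List.append_assoc]

theorem main (v : String) (vs : List String) :
    (v :: vs).foldl (fun tags value =>
      (PySem.Chars.splitOn value.toList ",".toList).foldl (fun tags token =>
        if PySem.Chars.strip token ≠ [] then tags ++ [String.ofList (PySem.Chars.strip token)]
        else tags) tags) []
    = (PySem.Chars.splitOn (PySem.Str.join "," (v :: vs)).toList ",".toList).filterMap gtok := by
  have hc : (",".toList : List Char) = [','] := by decide
  rw [outer_foldl, List.nil_append]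
  have hj : (PySem.Str.join "," (v :: vs)).toList
      = PySem.Chars.join [','] (v.toList :: vs.map String.toList) := by
    simp [PySem.Str.join]
  rw [hj, hc, splitOn_join, List.filterMap_append, filterMap_flatMap']
  simp [List.flatMap_cons, List.flatMap_map]

-- ===== VERDICT (by name: the statement is the Claim_ definition above) =====
theorem coerce_tags_py_spec : Claim_equal_coerce_tags_py := by
  intro raw _
  unfold Spec_coerce_tags_py
  match raw with
  | none => rfl
  | some [] => rfl
  | some (v :: vs) =>
    show coerce_tags_py (some (v :: vs)) = coerce_tags_py_alt (some (v :: vs))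
    simp only [coerce_tags_py, coerce_tags_py_alt]
    exact main v vs
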